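-- pv_equiv track=rewrite | github.com/flohlen/University | Informatik/EidI/Blatt7/test.py | programm4
-- ===== SOURCE A (Python) =====
-- def programm4(n):  # Eingabegroesse: n
-- 	i = 1
-- 	for j in range(n):
-- 		i *= 2
-- 	j = 1
-- 	for k in range(i):
-- 		k *= 2
-- 	return k
-- ===== SOURCE B (Python) =====
-- def programm4(n):
--     # Closed form: A's first loop computes i = 2**max(n, 0); its second loop
--     # leaves k = (i - 1) * 2, i.e. 2**(max(n, 0) + 1) - 2.
--     return 2 ** (max(n, 0) + 1) - 2
-- ===== Notes on version B (the rewrite author's own statement) =====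
-- stated objective: faster
-- what changed: Replaced the two loops (one doubling the accumulator n times, one iterating over an exponentially long range only to reuse the loop variable) with the closed form 2**(max(n,0)+1) - 2; intended as asymptotically faster - probe runs measured A taking 1000x+ B's time at the largest size both finished, though the probe could not always confirm a ratio because A times out there.
import Mathlib
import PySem

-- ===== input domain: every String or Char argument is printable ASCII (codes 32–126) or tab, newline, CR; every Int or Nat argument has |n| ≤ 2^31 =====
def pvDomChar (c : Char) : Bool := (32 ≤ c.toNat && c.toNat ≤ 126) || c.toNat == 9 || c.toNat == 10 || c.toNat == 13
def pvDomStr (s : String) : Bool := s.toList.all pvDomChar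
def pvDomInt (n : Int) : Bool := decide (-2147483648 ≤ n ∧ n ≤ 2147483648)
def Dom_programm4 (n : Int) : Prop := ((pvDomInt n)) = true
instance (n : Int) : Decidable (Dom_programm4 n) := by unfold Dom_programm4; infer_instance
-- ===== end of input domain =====

-- B replaces A's exponential two-loop computation with the closed form 2^(max(n,0)+1) - 2; intended as asymptotically faster (probe: A times out where B returns instantly).


-- ===== PORT A =====
-- Literal port: i = 1; for j in range(n): i *= 2; then for k in range(i): k *= 2; return k.
-- The second loop's state is overwritten by the range element each iteration (k = elem * 2);
-- since i = 2^max(n,0) ≥ 1 the loop always runs, so the fold's initial value (Python's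
-- otherwise-unbound k) never reaches the result.
def programm4 (n : Int) : Int :=
  let i : Int := (PySem.List.pyRange 0 n 1).foldl (fun i _ => i * 2) 1
  (PySem.List.pyRange 0 i 1).foldl (fun _ k => k * 2) 1

-- ===== PORT B =====
def programm4_alt (n : Int) : Int := 2 ^ (max n 0 + 1).toNat - 2

-- ===== PRECONDITION & SPEC =====
def Spec_programm4 (n : Int) (out : Int) : Prop := out = programm4_alt n
instance (n : Int) (out : Int) : Decidable (Spec_programm4 n out) := by unfold Spec_programm4; infer_instance

-- ===== CLAIM (what is proved, stated in full; the proofs are below) =====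
def Claim_equal_programm4 : Prop := ∀ (n : Int), Dom_programm4 n → Spec_programm4 n (programm4 n)

-- ===== LEMMAS AND PROOFS =====

-- First loop: doubling m times multiplies the accumulator by 2^m.
theorem pv_fold_double (m : Nat) (a : Int) :
    (PySem.List.pyRange 0 (m : Int) 1).foldl (fun i _ => i * 2) a = a * 2 ^ m := by
  induction m generalizing a with
  | zero =>
      rw [show ((0 : Nat) : Int) = 0 from rfl, PySem.List.pyRange_one_eq_nil (le_refl 0)]
      simp
  | succ m ih =>
      rw [show ((m + 1 : Nat) : Int) = (m : Int) + 1 by push_cast; ring,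
        PySem.List.pyRange_one_succ_right (by positivity : (0 : Int) ≤ (m : Int)),
        List.foldl_append, ih]
      simp only [List.foldl_cons, List.foldl_nil]
      rw [pow_succ]; ring

-- Second loop: the fold ignores its accumulator, so for i ≥ 1 the result is (i-1)*2.
theorem pv_fold_last (i : Int) (hi : 1 ≤ i) (a : Int) :
    (PySem.List.pyRange 0 i 1).foldl (fun _ k => k * 2) a = (i - 1) * 2 := by
  have h : i = (i - 1) + 1 := by ring
  rw [h, PySem.List.pyRange_one_succ_right (by omega : (0 : Int) ≤ i - 1),
    List.foldl_append]
  simp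

-- ===== VERDICT (by name: the statement is the Claim_ definition above) =====
theorem programm4_spec : Claim_equal_programm4 := by
  intro n _
  unfold Spec_programm4 programm4 programm4_alt
  rcases le_or_gt n 0 with hn | hn
  · rw [PySem.List.pyRange_one_eq_nil hn]
    simp only [List.foldl_nil]
    rw [pv_fold_last 1 (le_refl 1) 1]
    have : max n 0 = 0 := by omega
    rw [this]
    decide
  · have hcast : n = (n.toNat : Int) := by omega
    rw [hcast, pv_fold_double n.toNat 1, one_mul]
    have hpow : (1 : Int) ≤ 2 ^ n.toNat := one_le_pow₀ (by norm_num)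
    rw [pv_fold_last _ hpow 1]
    have hmax : max ((n.toNat : Int)) 0 = (n.toNat : Int) := by omega
    rw [hmax]
    have htn : ((n.toNat : Int) + 1).toNat = n.toNat + 1 := by omega
    rw [htn, pow_succ]
    ring
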